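-- pv_equiv track=rewrite | github.com/PaddlePaddle/Paddle | python/paddle/distributed/auto_parallel/tuner/profiler.py | get_cpp_error_type
-- ===== SOURCE A (Python) =====
-- def get_cpp_error_type(error):
--
--     msg = str(error).splitlines()
--     cpp_error_types = [
--         'InvalidArgumentError',
--         'NotFoundError',
--         'OutOfRangeError',
--         'AlreadyExistsError',
--         'ResourceExhaustedError',
--         'PreconditionNotMetError',
--         'PermissionDeniedError',
--         'ExecutionTimeoutError',
--         'UnimplementedError',
--         'UnavailableError',
--         'FatalError',
--         'ExternalError',
--     ]
--     error_type = 'FatalError'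
--     for et in cpp_error_types:
--         for line in msg:
--             if et in line:
--                 return et
--     return error_type
-- ===== SOURCE B (Python) =====
-- _CPP_ERROR_TYPES = [
--     'InvalidArgumentError',
--     'NotFoundError',
--     'OutOfRangeError',
--     'AlreadyExistsError',
--     'ResourceExhaustedError',
--     'PreconditionNotMetError',
--     'PermissionDeniedError',
--     'ExecutionTimeoutError',
--     'UnimplementedError',
--     'UnavailableError',
--     'FatalError',
--     'ExternalError',
-- ]
--
--
-- def get_cpp_error_type(error):
--     lines = str(error).splitlines()
--     found = {et for line in lines for et in _CPP_ERROR_TYPES if et in line}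
--     return next((et for et in _CPP_ERROR_TYPES if et in found), 'FatalError')
-- ===== Notes on version B (the rewrite author's own statement) =====
-- stated objective: alternative
-- what changed: Replaces A's early-returning priority-major nested scan with a build-then-resolve decomposition: one line-major pass collects the set of error types occurring on some line, then a single priority-ordered pass over the type list returns the first collected type.
import Mathlib
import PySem

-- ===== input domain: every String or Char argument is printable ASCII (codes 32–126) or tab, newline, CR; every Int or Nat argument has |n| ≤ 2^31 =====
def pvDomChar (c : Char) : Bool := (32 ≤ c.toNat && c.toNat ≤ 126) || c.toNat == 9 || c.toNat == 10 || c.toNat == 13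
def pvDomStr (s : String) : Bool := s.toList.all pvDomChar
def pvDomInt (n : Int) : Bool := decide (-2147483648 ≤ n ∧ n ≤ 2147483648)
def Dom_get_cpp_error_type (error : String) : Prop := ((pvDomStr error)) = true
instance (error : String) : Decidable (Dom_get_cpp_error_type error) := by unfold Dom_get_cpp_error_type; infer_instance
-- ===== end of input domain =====

-- B replaces A's early-returning priority-major nested scan by a build-then-resolve
-- decomposition (collect the set of occurring types, then resolve by priority); alternative, same cost.

def pvCppErrorTypes : List String :=
  [ "InvalidArgumentError", "NotFoundError", "OutOfRangeError", "AlreadyExistsError",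
    "ResourceExhaustedError", "PreconditionNotMetError", "PermissionDeniedError",
    "ExecutionTimeoutError", "UnimplementedError", "UnavailableError",
    "FatalError", "ExternalError" ]

-- ===== PORT A =====
-- inner 'for line in msg: if et in line: return et'
def pvAInner (et : String) : List String → Option String
  | [] => none
  | l :: ls => if PySem.Str.isIn et l then some et else pvAInner et ls

-- outer 'for et in cpp_error_types' with the early return threaded through
def pvAOuter (msg : List String) : List String → String
  | [] => "FatalError"
  | et :: rest =>
    match pvAInner et msg with
    | some r => r
    | none => pvAOuter msg rest

def get_cpp_error_type (error : String) : String :=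
  pvAOuter (PySem.Str.splitlines error) pvCppErrorTypes

-- ===== PORT B =====
-- first pass: for line in msg: for et in types: if et in line: found.add(et)
def pvBCollect (msg : List String) : PySem.Set String :=
  msg.foldl
    (fun s line =>
      pvCppErrorTypes.foldl (fun s et => if PySem.Str.isIn et line then PySem.Set.add s et else s) s)
    PySem.Set.empty

-- second pass: first type of the priority list that was collected
def pvBResolve (found : PySem.Set String) : List String → String
  | [] => "FatalError"
  | et :: rest => if PySem.Set.contains found et then et else pvBResolve found rest

def get_cpp_error_type_alt (error : String) : String :=
  pvBResolve (pvBCollect (PySem.Str.splitlines error)) pvCppErrorTypes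

-- ===== PRECONDITION & SPEC =====
def Spec_get_cpp_error_type (error : String) (out : String) : Prop := out = get_cpp_error_type_alt error
instance (error : String) (out : String) : Decidable (Spec_get_cpp_error_type error out) := by unfold Spec_get_cpp_error_type; infer_instance

-- ===== CLAIM (what is proved, stated in full; the proofs are below) =====
def Claim_equal_get_cpp_error_type : Prop := ∀ (error : String), Dom_get_cpp_error_type error → Spec_get_cpp_error_type error (get_cpp_error_type error)

-- ===== LEMMAS AND PROOFS =====

-- A's inner loop returns 'some et' exactly when some line contains et
theorem pvAInner_eq (et : String) (msg : List String) :
    pvAInner et msg = if msg.any (fun l => PySem.Str.isIn et l) then some et else none := by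
  induction msg with
  | nil => rfl
  | cons l ls ih =>
    show (if PySem.Str.isIn et l then some et else pvAInner et ls) = _
    rw [ih, List.any_cons]
    by_cases h : PySem.Str.isIn et l = true
    · rw [if_pos h, if_pos (by rw [h]; simp)]
    · rw [if_neg h]
      by_cases h2 : ls.any (fun l => PySem.Str.isIn et l) = true
      · rw [if_pos h2, if_pos (by rw [h2]; simp)]
      · rw [if_neg h2, if_neg (fun hc => Or.elim ((Bool.or_eq_true _ _).mp hc) h h2)]

-- membership in B's inner fold over one line
theorem pvB_inner_mem (line : String) (ts : List String) (s : PySem.Set String) (x : String) :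
    x ∈ ts.foldl (fun s et => if PySem.Str.isIn et line then PySem.Set.add s et else s) s ↔
      x ∈ s ∨ (x ∈ ts ∧ PySem.Str.isIn x line = true) := by
  induction ts generalizing s with
  | nil => simp
  | cons et rest ih =>
    rw [List.foldl_cons]
    by_cases h : PySem.Str.isIn et line = true
    · rw [if_pos h, ih, PySem.Set.mem_add]
      simp only [List.mem_cons]
      constructor
      · rintro ((hx | rfl) | hx)
        · exact Or.inl hx
        · exact Or.inr ⟨Or.inl rfl, h⟩
        · exact Or.inr ⟨Or.inr hx.1, hx.2⟩
      · rintro (hx | ⟨(rfl | hm), hin⟩)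
        · exact Or.inl (Or.inl hx)
        · exact Or.inl (Or.inr rfl)
        · exact Or.inr ⟨hm, hin⟩
    · rw [if_neg h, ih]
      simp only [List.mem_cons]
      constructor
      · rintro (hx | hx)
        · exact Or.inl hx
        · exact Or.inr ⟨Or.inr hx.1, hx.2⟩
      · rintro (hx | ⟨(rfl | hm), hin⟩)
        · exact Or.inl hx
        · exact absurd hin h
        · exact Or.inr ⟨hm, hin⟩

-- membership in B's collected set
theorem pvBCollect_mem (msg : List String) (x : String) :
    x ∈ pvBCollect msg ↔ x ∈ pvCppErrorTypes ∧ ∃ l ∈ msg, PySem.Str.isIn x l = true := by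
  have main : ∀ (m : List String) (s : PySem.Set String),
      x ∈ m.foldl (fun s line => pvCppErrorTypes.foldl
            (fun s et => if PySem.Str.isIn et line then PySem.Set.add s et else s) s) s ↔
        x ∈ s ∨ (x ∈ pvCppErrorTypes ∧ ∃ l ∈ m, PySem.Str.isIn x l = true) := by
    intro m
    induction m with
    | nil => intro s; simp
    | cons line rest ih =>
      intro s
      rw [List.foldl_cons, ih, pvB_inner_mem]
      simp only [List.mem_cons]
      constructor
      · rintro ((hx | ⟨hm, hin⟩) | ⟨hm, l, hl, hin⟩)
        · exact Or.inl hx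
        · exact Or.inr ⟨hm, line, Or.inl rfl, hin⟩
        · exact Or.inr ⟨hm, l, Or.inr hl, hin⟩
      · rintro (hx | ⟨hm, l, (rfl | hl), hin⟩)
        · exact Or.inl (Or.inl hx)
        · exact Or.inl (Or.inr ⟨hm, hin⟩)
        · exact Or.inr ⟨hm, l, hl, hin⟩
  rw [pvBCollect, main]
  simp [PySem.Set.empty]

-- the two traversals agree on any priority suffix made of registered types
theorem pv_outer_eq (msg : List String) (ts : List String)
    (hts : ∀ x ∈ ts, x ∈ pvCppErrorTypes) :
    pvAOuter msg ts = pvBResolve (pvBCollect msg) ts := by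
  induction ts with
  | nil => rfl
  | cons et rest ih =>
    have hmem : et ∈ pvCppErrorTypes := hts et (List.mem_cons_self ..)
    have hrest : ∀ x ∈ rest, x ∈ pvCppErrorTypes := fun x hx => hts x (List.mem_cons_of_mem _ hx)
    show (match pvAInner et msg with
          | some r => r
          | none => pvAOuter msg rest) =
        (if PySem.Set.contains (pvBCollect msg) et then et else pvBResolve (pvBCollect msg) rest)
    rw [pvAInner_eq]
    by_cases h : msg.any (fun l => PySem.Str.isIn et l) = true
    · have hc : PySem.Set.contains (pvBCollect msg) et = true := by
        rw [PySem.Set.contains_iff, pvBCollect_mem]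
        rcases List.any_eq_true.mp h with ⟨l, hl, hin⟩
        exact ⟨hmem, l, hl, hin⟩
      rw [if_pos h, if_pos hc]
    · have hc : ¬ PySem.Set.contains (pvBCollect msg) et = true := by
        rw [PySem.Set.contains_iff, pvBCollect_mem]
        rintro ⟨-, l, hl, hin⟩
        exact h (List.any_eq_true.mpr ⟨l, hl, hin⟩)
      rw [if_neg h, if_neg hc, ih hrest]

-- ===== VERDICT (by name: the statement is the Claim_ definition above) =====
theorem get_cpp_error_type_spec : Claim_equal_get_cpp_error_type := by
  intro error _
  unfold Spec_get_cpp_error_type get_cpp_error_type get_cpp_error_type_alt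
  exact pv_outer_eq _ _ (fun x hx => hx)
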